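-- pv_equiv track=rewrite | github.com/DS-Ninja/news-bias-bot | app.py | _calendar_health
-- ===== SOURCE A (Python) =====
-- from typing import Dict, List, Tuple, Any, Optional
--
-- def _calendar_health(upcoming: List[Dict[str, Any]]) -> Dict[str, Any]:
--     usd = 0
--     known = 0
--     unknown = 0
--     timed = 0
--     for x in upcoming or []:
--         c = (x.get("currency") or "")
--         if c:
--             known += 1
--             if str(c).upper() == "USD":
--                 usd += 1
--         else:
--             unknown += 1
--         if x.get("ts"):
--             timed += 1
--     return {
--         "usd": usd,
--         "known_currency": known,
--         "unknown_currency": unknown,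
--         "timed": timed,
--         "total": len(upcoming or []),
--     }
-- ===== SOURCE B (Python) =====
-- def _calendar_health(upcoming):
--     evs = upcoming or []
--     cnt = {}
--     for x in evs:
--         c = x.get("currency")
--         k = "" if not c else str(c).upper()
--         cnt[k] = cnt.get(k, 0) + 1
--     unknown = cnt.get("", 0)
--     return {
--         "usd": cnt.get("USD", 0),
--         "known_currency": len(evs) - unknown,
--         "unknown_currency": unknown,
--         "timed": sum(1 for x in evs if x.get("ts")),
--         "total": len(evs),
--     }
-- ===== Notes on version B (the rewrite author's own statement) =====
-- stated objective: alternative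
-- what changed: B builds a histogram (dict counter) keyed by the normalized currency in one pass and then indexes it for usd/unknown, derives known_currency as total minus unknown, and computes timed as a separate generator sum, instead of A's four inline counters with nested branches.
import Mathlib
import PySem

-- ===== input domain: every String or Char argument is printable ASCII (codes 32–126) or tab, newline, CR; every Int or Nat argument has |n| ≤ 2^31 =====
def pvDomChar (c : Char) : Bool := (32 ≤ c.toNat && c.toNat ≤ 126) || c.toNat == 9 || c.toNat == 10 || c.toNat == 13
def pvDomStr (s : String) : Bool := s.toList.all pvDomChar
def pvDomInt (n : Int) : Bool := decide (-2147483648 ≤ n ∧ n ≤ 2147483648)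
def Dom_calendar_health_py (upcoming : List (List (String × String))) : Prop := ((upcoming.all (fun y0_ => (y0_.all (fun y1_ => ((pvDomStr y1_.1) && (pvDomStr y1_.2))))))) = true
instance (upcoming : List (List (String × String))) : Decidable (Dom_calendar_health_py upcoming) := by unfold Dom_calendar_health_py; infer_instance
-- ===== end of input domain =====

-- B replaces A's four inline counters with a currency histogram built in one pass,
-- indexed afterwards (known_currency = total - unknown); alternative decomposition, same cost.

-- ===== PORT A =====
-- x.get("currency") or "" : first-match assoc lookup, falsy (missing or "") → ""
def chCurr (x : List (String × String)) : String := (x.lookup "currency").getD ""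
def chTs (x : List (String × String)) : String := (x.lookup "ts").getD ""

-- loop body of A: state (usd, known, unknown, timed)
def chA_step (s : Int × Int × Int × Int) (x : List (String × String)) : Int × Int × Int × Int :=
  let c := chCurr x
  let s1 :=
    if c ≠ "" then
      if PySem.Str.upper c = "USD" then (s.1 + 1, s.2.1 + 1, s.2.2.1, s.2.2.2)
      else (s.1, s.2.1 + 1, s.2.2.1, s.2.2.2)
    else (s.1, s.2.1, s.2.2.1 + 1, s.2.2.2)
  if chTs x ≠ "" then (s1.1, s1.2.1, s1.2.2.1, s1.2.2.2 + 1) else s1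

def calendar_health_py (upcoming : List (List (String × String))) : List (String × Int) :=
  let s := upcoming.foldl chA_step (0, 0, 0, 0)
  [("usd", s.1), ("known_currency", s.2.1), ("unknown_currency", s.2.2.1),
   ("timed", s.2.2.2), ("total", (upcoming.length : Int))]

-- ===== PORT B =====
-- k = "" if not c else str(c).upper()
def chNorm (x : List (String × String)) : String :=
  let c := chCurr x
  if c = "" then "" else PySem.Str.upper c

def calendar_health_py_alt (upcoming : List (List (String × String))) : List (String × Int) :=
  let cnt := upcoming.foldl (fun d x => d.insert (chNorm x) (d.getD (chNorm x) 0 + 1))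
               (PySem.Dict.empty : PySem.Dict String Int)
  let unknown := cnt.getD "" 0
  [("usd", cnt.getD "USD" 0),
   ("known_currency", (upcoming.length : Int) - unknown),
   ("unknown_currency", unknown),
   ("timed", ((upcoming.filter (fun x => chTs x ≠ "")).length : Int)),
   ("total", (upcoming.length : Int))]

-- ===== PRECONDITION & SPEC =====
def Spec_calendar_health_py (upcoming : List (List (String × String))) (out : List (String × Int)) : Prop := out = calendar_health_py_alt upcoming
instance (upcoming : List (List (String × String))) (out : List (String × Int)) : Decidable (Spec_calendar_health_py upcoming out) := by unfold Spec_calendar_health_py; infer_instance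

-- ===== CLAIM (what is proved, stated in full; the proofs are below) =====
def Claim_equal_calendar_health_py : Prop := ∀ (upcoming : List (List (String × String))), Dom_calendar_health_py upcoming → Spec_calendar_health_py upcoming (calendar_health_py upcoming)

-- ===== LEMMAS AND PROOFS =====

-- the four counts A maintains, as countP's
def pUsd (x : List (String × String)) : Bool := chCurr x ≠ "" && PySem.Str.upper (chCurr x) = "USD"
def pKnown (x : List (String × String)) : Bool := chCurr x ≠ ""
def pTs (x : List (String × String)) : Bool := chTs x ≠ ""

lemma foldA_eq (l : List (List (String × String))) (u k n t : Int) :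
    l.foldl chA_step (u, k, n, t) =
      (u + l.countP pUsd, k + l.countP pKnown,
       n + l.countP (fun x => !pKnown x), t + l.countP pTs) := by
  induction l generalizing u k n t with
  | nil => simp
  | cons x xs ih =>
    simp only [List.foldl_cons, List.countP_cons]
    rw [show chA_step (u, k, n, t) x =
        (u + (if pUsd x then 1 else 0), k + (if pKnown x then 1 else 0),
         n + (if !pKnown x then 1 else 0), t + (if pTs x then 1 else 0)) by
      simp only [chA_step, pUsd, pKnown, pTs]
      split_ifs <;> simp_all]
    rw [ih]
    push_cast
    ring_nf

-- upper of a nonempty string is nonempty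
lemma upper_ne_empty (s : String) (h : s ≠ "") : PySem.Str.upper s ≠ "" := by
  intro hc
  apply h
  have hl : (PySem.Str.upper s).toList = PySem.Chars.upper s.toList := by
    simp [pysem]
  rw [hc] at hl
  have : s.toList = [] := by
    cases hs : s.toList with
    | nil => rfl
    | cons a as => rw [hs] at hl; simp [PySem.Chars.upper] at hl
  cases s; simp_all

lemma norm_usd (x : List (String × String)) : (chNorm x = "USD") = (pUsd x = true) := by
  simp only [chNorm, pUsd]
  split_ifs with h <;> simp [h]

lemma norm_unknown (x : List (String × String)) : (chNorm x = "") = ((!pKnown x) = true) := by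
  simp only [chNorm, pKnown]
  split_ifs with h
  · simp [h]
  · simp [h, upper_ne_empty _ h]

-- ===== VERDICT (by name: the statement is the Claim_ definition above) =====
theorem calendar_health_py_spec : Claim_equal_calendar_health_py := by
  intro l _
  unfold Spec_calendar_health_py calendar_health_py calendar_health_py_alt
  simp only [foldA_eq, zero_add]
  rw [show (l.foldl (fun d x => d.insert (chNorm x) (d.getD (chNorm x) 0 + 1))
        (PySem.Dict.empty : PySem.Dict String Int)) =
      (l.map chNorm).foldl (fun d k => d.insert k (d.getD k 0 + 1)) PySem.Dict.empty from
    by simp [List.foldl_map]]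
  rw [PySem.Dict.getD_foldl_insert_add_one, PySem.Dict.getD_foldl_insert_add_one]
  simp only [PySem.Dict.getD_empty, zero_add]
  have hcount : ∀ (v : String), ((l.map chNorm).count v : Int) = l.countP (fun x => chNorm x == v) := by
    intro v
    rw [List.count_eq_countP, List.countP_map]
    rfl
  rw [hcount, hcount]
  have h1 : l.countP (fun x => chNorm x == "USD") = l.countP pUsd := by
    apply List.countP_congr; intro x _; simp [norm_usd x]
  have h2 : l.countP (fun x => chNorm x == "") = l.countP (fun x => !pKnown x) := by
    apply List.countP_congr; intro x _; simp [norm_unknown x]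
  have h3 : l.countP pKnown + l.countP (fun x => !pKnown x) = l.length := by
    rw [List.length_eq_countP_add_countP (l := l) (p := pKnown)]
    congr 1
    apply List.countP_congr; intro x _; simp
  have h4 : (l.filter (fun x => chTs x ≠ "")).length = l.countP pTs := by
    rw [List.countP_eq_length_filter]; congr 1
  simp only [h1, h2, h4]
  have h5 : ((l.countP pKnown : Int)) = (l.length : Int) - (l.countP (fun x => !pKnown x) : Int) := by
    omega
  rw [h5]
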